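-- pv_equiv track=rewrite | github.com/pdef/pdef | compiler/src/pdef_python/generator.py | _modules_with_children
-- ===== SOURCE A (Python) =====
-- def _modules_with_children(module_names):
--     parent_names = set()
--
--     for name in module_names:
--         if '.' not in name:
--             # It's a simple module without children.
--             continue
--
--         # Add all modules in a name as distinct modules, except for the last one,
--         # i.e. mycompany.service.client.tests:
--         # mycompany
--         # mycompany.service
--         # mycompany.service.client
--         # but not mycompany.service.client.tests
--         pname = ''
--         parts = name.split('.')[:-1]
--         for part in parts:
--             pname = part if not pname else (pname + '.' + part)
--             parent_names.add(pname)
--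
--     return parent_names
-- ===== SOURCE B (Python) =====
-- def _modules_with_children(module_names):
--     # Every '.' in a name marks the end of a parent module: take the prefix
--     # up to each separator.
--     return {name[:i]
--             for name in module_names
--             for i, c in enumerate(name)
--             if c == '.'}
-- ===== Notes on version B (the rewrite author's own statement) =====
-- stated objective: simpler
-- what changed: B is a single set comprehension that slices the name at each '.' position, instead of A's split('.'), drop-the-last-part and incremental re-join loop; Pre_ restricts to well-formed dotted names, excluding names that start with '.' and contain a second dot -- a malformed shape on which no parent set is specified and the two make different, equally defensible choices (A treats the leading dots as absent, B takes the literal prefixes).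
-- outside the precondition, e.g. on _modules_with_children(['.a.b']): A returns {'', 'a'}, B returns {'', '.a'}; on _modules_with_children(['..x']): A returns {''}, B returns {'', '.'}
import Mathlib
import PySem

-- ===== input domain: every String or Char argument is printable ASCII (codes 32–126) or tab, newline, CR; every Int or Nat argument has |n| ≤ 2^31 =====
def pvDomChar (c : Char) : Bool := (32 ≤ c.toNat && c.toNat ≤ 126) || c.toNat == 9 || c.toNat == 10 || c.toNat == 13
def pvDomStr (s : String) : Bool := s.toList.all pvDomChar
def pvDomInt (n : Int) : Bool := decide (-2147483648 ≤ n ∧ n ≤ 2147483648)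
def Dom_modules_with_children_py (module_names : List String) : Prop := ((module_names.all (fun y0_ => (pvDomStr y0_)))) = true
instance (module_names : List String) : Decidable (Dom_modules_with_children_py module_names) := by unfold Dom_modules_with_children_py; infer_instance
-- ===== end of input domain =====

-- B replaces A's split('.')/drop-last/re-join per name by a set comprehension slicing the
-- name at every '.' position. Python's return type is set[str]: a PySem.Set String.

-- ===== PORT A =====
-- hand port of name.split('.') (single-character separator), exact: '' -> [''], splits at every '.'
def pvSplitDot : List Char → List (List Char)
  | [] => [[]]
  | c :: r =>
    if c = '.' then [] :: pvSplitDot r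
    else
      match pvSplitDot r with
      | p :: ps => (c :: p) :: ps
      | [] => [[c]]

-- str values (pname, the parts) are carried as List Char; str concatenation is List append (exact),
-- Python's 'not pname' on a str is the emptiness test.
def modules_with_children_py (module_names : List String) : List String :=
  module_names.foldl (fun parent_names name =>
    if PySem.Str.isIn "." name = true then
      let parts := PySem.List.slice (pvSplitDot name.toList) none (some (-1))   -- name.split('.')[:-1]
      (parts.foldl (fun (st : List Char × PySem.Set String) part =>
          let pname := if st.1 = [] then part else st.1 ++ '.' :: part
          (pname, st.2.add (String.ofList pname))) (([] : List Char), parent_names)).2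
    else parent_names) []

-- ===== PORT B =====
-- the set comprehension: for each name, for (i, c) in enumerate(name), if c == '.' add name[:i]
-- (name[:i] → PySem.List.slice on the char list, exact).
def modules_with_children_py_alt (module_names : List String) : List String :=
  module_names.foldl (fun parent_names name =>
    (PySem.List.enumerate name.toList 0).foldl (fun (s : PySem.Set String) ic =>
        if ic.2 = '.' then s.add (String.ofList (PySem.List.slice name.toList none (some ic.1))) else s)
      parent_names) []

-- ===== PRECONDITION & SPEC =====
-- Pre_ restricts to lists of well-formed dotted names: it excludes names that start with
-- '.' and contain a second dot (e.g. '.a.b'), a malformed shape for a module name on which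
-- no parent set is specified and the two make different, equally defensible choices
-- (A treats the leading dots as absent, {'', 'a'}; B takes the literal prefixes, {'', '.a'}).
def Pre_modules_with_children_py (module_names : List String) : Prop :=
  ∀ name ∈ module_names, ¬ (name.toList.head? = some '.' ∧ '.' ∈ name.toList.tail)
instance (module_names : List String) : Decidable (Pre_modules_with_children_py module_names) := by unfold Pre_modules_with_children_py; infer_instance

def pvWitness_modules_with_children_py : List String := ["mycompany.service.client", "a..b", "solo"]

def Spec_modules_with_children_py (module_names : List String) (out : List String) : Prop := out = modules_with_children_py_alt module_names
instance (module_names : List String) (out : List String) : Decidable (Spec_modules_with_children_py module_names out) := by unfold Spec_modules_with_children_py; infer_instance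

-- ===== CLAIM (what is proved, stated in full; the proofs are below) =====
def Claim_equal_modules_with_children_py : Prop := ∀ (module_names : List String), Dom_modules_with_children_py module_names → Pre_modules_with_children_py module_names → Spec_modules_with_children_py module_names (modules_with_children_py module_names)

-- ===== LEMMAS AND PROOFS =====

-- the sequence of pnames A's inner loop adds, given the current pname and the remaining parts
def pvAddsA : List Char → List (List Char) → List (List Char)
  | _, [] => []
  | pname, q :: ps =>
    let pn := if pname = [] then q else pname ++ '.' :: q
    pn :: pvAddsA pn ps

-- the sequence of prefixes B's inner loop adds: the prefix before each '.' of the remaining chars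
def pvAddsB : List Char → List Char → List (List Char)
  | _, [] => []
  | pre, c :: r =>
    if c = '.' then pre :: pvAddsB (pre ++ [c]) r
    else pvAddsB (pre ++ [c]) r

theorem pvFoldA_eq (ps : List (List Char)) : ∀ (pname : List Char) (s : PySem.Set String),
    (ps.foldl (fun (st : List Char × PySem.Set String) part =>
        let pname := if st.1 = [] then part else st.1 ++ '.' :: part
        (pname, st.2.add (String.ofList pname))) (pname, s)).2
      = (pvAddsA pname ps).foldl (fun s p => s.add (String.ofList p)) s := by
  induction ps with
  | nil => intro pname s; rfl
  | cons q ps ih => intro pname s; simp only [List.foldl_cons, pvAddsA, ih]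

-- B's fold over enumerate, with pre chars already consumed, adds exactly pvAddsB pre cs
theorem pvFoldB_eq (cs : List Char) : ∀ (pre : List Char) (s : PySem.Set String),
    ((PySem.List.enumerate cs (pre.length : Int)).foldl (fun (s : PySem.Set String) ic =>
        if ic.2 = '.' then s.add (String.ofList (PySem.List.slice (pre ++ cs) none (some ic.1))) else s) s)
      = (pvAddsB pre cs).foldl (fun s p => s.add (String.ofList p)) s := by
  induction cs with
  | nil => intro pre s; simp [PySem.List.enumerate_nil, pvAddsB]
  | cons c r ih =>
    intro pre s
    rw [PySem.List.enumerate_cons]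
    simp only [List.foldl_cons, pvAddsB]
    have hsl : PySem.List.slice (pre ++ c :: r) none (some (pre.length : Int)) = pre := by
      rw [PySem.List.slice_to_natCast]
      simp
    have hrec : ∀ t, ((PySem.List.enumerate r ((pre.length : Int) + 1)).foldl
        (fun (s : PySem.Set String) ic =>
          if ic.2 = '.' then s.add (String.ofList (PySem.List.slice (pre ++ c :: r) none (some ic.1))) else s) t)
        = (pvAddsB (pre ++ [c]) r).foldl (fun s p => s.add (String.ofList p)) t := by
      intro t
      have := ih (pre ++ [c]) t
      simp only [List.length_append, List.length_cons, List.length_nil] at this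
      have harr : (pre ++ [c]) ++ r = pre ++ c :: r := by simp
      have hcast : ((pre.length + 1 : Nat) : Int) = (pre.length : Int) + 1 := by push_cast; ring
      rw [harr, hcast] at this
      exact this
    by_cases hc : c = '.'
    · subst hc
      simp only [reduceIte, hsl, hrec]
      rfl
    · simp only [if_neg hc, hrec]

theorem pvAddsB_no_dot {cs : List Char} (h : '.' ∉ cs) : ∀ pre, pvAddsB pre cs = [] := by
  induction cs with
  | nil => intro _; rfl
  | cons c r ih =>
    intro pre
    have hc : c ≠ '.' := fun e => h (e ▸ List.mem_cons_self)
    have hr : '.' ∉ r := fun m => h (List.mem_cons_of_mem _ m)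
    simp only [pvAddsB, if_neg (fun e => hc e), ih hr]

theorem pvAddsB_decomp {v : List Char} (hv : '.' ∉ v) : ∀ (pre r : List Char),
    pvAddsB pre (v ++ '.' :: r) = (pre ++ v) :: pvAddsB (pre ++ v ++ ['.']) r := by
  induction v with
  | nil =>
    intro pre r
    simp [pvAddsB]
  | cons c v ih =>
    intro pre r
    have hc : c ≠ '.' := fun e => hv (e ▸ List.mem_cons_self)
    have hv' : '.' ∉ v := fun m => hv (List.mem_cons_of_mem _ m)
    have := ih hv' (pre ++ [c]) r
    simp only [List.cons_append, pvAddsB, if_neg (fun e => hc e)]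
    rw [this]
    simp [List.append_assoc]

theorem pvSplitDot_no_dot {cs : List Char} (h : '.' ∉ cs) : pvSplitDot cs = [cs] := by
  induction cs with
  | nil => rfl
  | cons c r ih =>
    have hc : c ≠ '.' := fun e => h (e ▸ List.mem_cons_self)
    have hr : '.' ∉ r := fun m => h (List.mem_cons_of_mem _ m)
    simp only [pvSplitDot, if_neg (fun e => hc e), ih hr]

theorem pvSplitDot_ne_nil (cs : List Char) : pvSplitDot cs ≠ [] := by
  cases cs with
  | nil => simp [pvSplitDot]
  | cons c r =>
    simp only [pvSplitDot]
    split
    · simp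
    · split <;> simp

theorem pvSplitDot_decomp {v : List Char} (hv : '.' ∉ v) (r : List Char) :
    pvSplitDot (v ++ '.' :: r) = v :: pvSplitDot r := by
  induction v with
  | nil => simp [pvSplitDot]
  | cons c v ih =>
    have hc : c ≠ '.' := fun e => hv (e ▸ List.mem_cons_self)
    have hv' : '.' ∉ v := fun m => hv (List.mem_cons_of_mem _ m)
    simp only [List.cons_append, pvSplitDot, if_neg (fun e => hc e), ih hv']

theorem pvDotDecomp {cs : List Char} (h : '.' ∈ cs) :
    ∃ v r, cs = v ++ '.' :: r ∧ '.' ∉ v := by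
  induction cs with
  | nil => cases h
  | cons c cs ih =>
    by_cases hc : c = '.'
    · exact ⟨[], cs, by simp [hc], by simp⟩
    · have h' : '.' ∈ cs := by
        rcases List.mem_cons.1 h with h1 | h1
        · exact absurd h1.symm hc
        · exact h1
      rcases ih h' with ⟨v, r, hvr, hv⟩
      exact ⟨c :: v, r, by rw [hvr]; rfl, by
        intro hm
        rcases List.mem_cons.1 hm with h2 | h2
        · exact hc h2.symm
        · exact hv h2⟩

-- once the pname is nonempty, A's remaining additions equal B's with prefix pname ++ ['.']
theorem pvMainQ : ∀ n (r : List Char), r.length ≤ n → ∀ (pname : List Char), pname ≠ [] →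
    pvAddsA pname (PySem.List.slice (pvSplitDot r) none (some (-1)))
      = pvAddsB (pname ++ ['.']) r := by
  intro n
  induction n with
  | zero =>
    intro r hr pname hp
    have : r = [] := List.length_eq_zero_iff.1 (Nat.le_zero.1 hr)
    subst this
    simp [pvSplitDot, pvAddsB, PySem.List.slice, PySem.List.clampIdx, pvAddsA]
  | succ n ih =>
    intro r hr pname hp
    by_cases hdot : '.' ∈ r
    · rcases pvDotDecomp hdot with ⟨v, r', rfl, hv⟩
      have hlt : r'.length ≤ n := by
        have := hr; simp only [List.length_append, List.length_cons] at this; omega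
      rw [PySem.List.slice_to_neg_one, pvSplitDot_decomp hv r',
        List.dropLast_cons_of_ne_nil (pvSplitDot_ne_nil r')]
      have hpn : pname ++ '.' :: v ≠ [] := by simp
      simp only [pvAddsA, if_neg hp]
      rw [← PySem.List.slice_to_neg_one (pvSplitDot r'), ih r' hlt _ hpn,
        pvAddsB_decomp hv (pname ++ ['.']) r']
      simp [List.append_assoc]
    · rw [pvSplitDot_no_dot hdot, pvAddsB_no_dot hdot]
      simp [PySem.List.slice, PySem.List.clampIdx, pvAddsA]

-- per good name ('.' ∈ cs but not (head '.' with a second dot)): A's and B's additions coincide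
theorem pvMainM (cs : List Char) (hdot : '.' ∈ cs)
    (hgood : ¬ (cs.head? = some '.' ∧ '.' ∈ cs.tail)) :
    pvAddsA [] (PySem.List.slice (pvSplitDot cs) none (some (-1))) = pvAddsB [] cs := by
  rcases pvDotDecomp hdot with ⟨v, r, rfl, hv⟩
  rw [PySem.List.slice_to_neg_one, pvSplitDot_decomp hv r,
    List.dropLast_cons_of_ne_nil (pvSplitDot_ne_nil r)]
  simp only [pvAddsA, reduceIte]
  rcases v with _ | ⟨c, v'⟩
  · -- name starts with '.'; by hgood no dot in r
    have hr : '.' ∉ r := by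
      intro hm
      exact hgood ⟨rfl, by simpa using hm⟩
    rw [pvSplitDot_no_dot hr]
    simp [pvAddsA, pvAddsB, pvAddsB_no_dot hr]
  · -- nonempty first component
    rw [← PySem.List.slice_to_neg_one (pvSplitDot r),
      pvMainQ r.length r le_rfl (c :: v') (by simp),
      pvAddsB_decomp hv [] r]
    simp

theorem pvIsIn_dot (name : String) :
    PySem.Str.isIn "." name = true ↔ '.' ∈ name.toList := by
  have h := PySem.Chars.isIn_iff_infix (".".toList) name.toList
  have hdl : ".".toList = ['.'] := rfl
  constructor
  · intro hh
    rcases (h.1 hh) with ⟨s, t, hst⟩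
    rw [hdl] at hst
    rw [← hst]; simp
  · intro hm
    apply h.2
    rcases List.append_of_mem hm with ⟨s, t, hst⟩
    refine ⟨s, t, ?_⟩
    rw [hdl, hst]; simp

-- per-name: A's loop step equals B's loop step from any set, for a good name
theorem pvStep_eq (name : String)
    (hgood : ¬ (name.toList.head? = some '.' ∧ '.' ∈ name.toList.tail))
    (s : PySem.Set String) :
    (if PySem.Str.isIn "." name = true then
      (((PySem.List.slice (pvSplitDot name.toList) none (some (-1))).foldl
          (fun (st : List Char × PySem.Set String) part =>
            let pname := if st.1 = [] then part else st.1 ++ '.' :: part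
            (pname, st.2.add (String.ofList pname))) (([] : List Char), s)).2)
     else s)
    = (PySem.List.enumerate name.toList 0).foldl (fun (s : PySem.Set String) ic =>
        if ic.2 = '.' then s.add (String.ofList (PySem.List.slice name.toList none (some ic.1))) else s) s := by
  have hB := pvFoldB_eq name.toList [] s
  simp only [List.nil_append, List.length_nil, Nat.cast_zero] at hB
  rw [hB]
  by_cases hdot : '.' ∈ name.toList
  · rw [if_pos ((pvIsIn_dot name).2 hdot), pvFoldA_eq, pvMainM name.toList hdot hgood]
  · rw [if_neg (fun hh => hdot ((pvIsIn_dot name).1 hh)), pvAddsB_no_dot hdot]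
    rfl

theorem pvFoldl_congr {a b : Type} (fA fB : b → a → b) (l : List a)
    (h : ∀ x ∈ l, ∀ s, fA s x = fB s x) : ∀ s, l.foldl fA s = l.foldl fB s := by
  induction l with
  | nil => intro s; rfl
  | cons x l ih =>
    intro s
    simp only [List.foldl_cons, h x List.mem_cons_self]
    exact ih (fun y hy s => h y (List.mem_cons_of_mem _ hy) s) _

-- ===== VERDICT (by name: the statements are the Claim_ definitions above) =====
theorem modules_with_children_py_spec : Claim_equal_modules_with_children_py := by
  intro module_names _ hpre
  unfold Spec_modules_with_children_py modules_with_children_py modules_with_children_py_alt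
  exact pvFoldl_congr _ _ module_names (fun name hmem s => pvStep_eq name (hpre name hmem) s) []
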